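-- pv_equiv track=rewrite | github.com/datlasuji/codecrafters-shell-python | app/main.py | parse_redirection
-- ===== SOURCE A (Python) =====
-- def parse_redirection(command_parts):
--     """Parse redirection operators and return command parts and output files if any."""
--     stdout_file = None
--     stderr_file = None
--     stdout_append = False
--     stderr_append = False
--     i = 0
--
--     while i < len(command_parts):
--         if command_parts[i] in [">", "1>"]:
--             if i + 1 < len(command_parts):
--                 stdout_file = command_parts[i + 1]
--                 stdout_append = False
--                 command_parts = command_parts[:i] + command_parts[i+2:]
--                 continue
--         elif command_parts[i] in [">>", "1>>"]:
--             if i + 1 < len(command_parts):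
--                 stdout_file = command_parts[i + 1]
--                 stdout_append = True
--                 command_parts = command_parts[:i] + command_parts[i+2:]
--                 continue
--         elif command_parts[i] == "2>":
--             if i + 1 < len(command_parts):
--                 stderr_file = command_parts[i + 1]
--                 stderr_append = False
--                 command_parts = command_parts[:i] + command_parts[i+2:]
--                 continue
--         elif command_parts[i] == "2>>":
--             if i + 1 < len(command_parts):
--                 stderr_file = command_parts[i + 1]
--                 stderr_append = True
--                 command_parts = command_parts[:i] + command_parts[i+2:]
--                 continue
--         i += 1
--
--     return command_parts, stdout_file, stderr_file, stdout_append, stderr_append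
-- ===== SOURCE B (Python) =====
-- _OPS = (">", "1>", ">>", "1>>", "2>", "2>>")
--
-- def parse_redirection(command_parts):
--     """Single forward pass: copy non-operator tokens, consume operator+target pairs."""
--     cleaned = []
--     stdout_file = None
--     stderr_file = None
--     stdout_append = False
--     stderr_append = False
--     n = len(command_parts)
--     j = 0
--     while j < n:
--         tok = command_parts[j]
--         if j + 1 < n and tok in _OPS:
--             target = command_parts[j + 1]
--             if tok in (">", "1>"):
--                 stdout_file, stdout_append = target, False
--             elif tok in (">>", "1>>"):
--                 stdout_file, stdout_append = target, True
--             elif tok == "2>":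
--                 stderr_file, stderr_append = target, False
--             else:
--                 stderr_file, stderr_append = target, True
--             j += 2
--         else:
--             cleaned.append(tok)
--             j += 1
--     return cleaned, stdout_file, stderr_file, stdout_append, stderr_append
-- ===== Notes on version B (the rewrite author's own statement) =====
-- stated objective: alternative
-- what changed: A repeatedly rebuilds the argument list with slice concatenations (parts[:i]+parts[i+2:]) inside its scan; B makes one forward pass that appends non-operator tokens to a fresh list and skips operator+target pairs by advancing the index by 2, never slicing the remainder (quadratic only when many operators occur; on operator-free input both are linear and B is not measurably faster).
import Mathlib
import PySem

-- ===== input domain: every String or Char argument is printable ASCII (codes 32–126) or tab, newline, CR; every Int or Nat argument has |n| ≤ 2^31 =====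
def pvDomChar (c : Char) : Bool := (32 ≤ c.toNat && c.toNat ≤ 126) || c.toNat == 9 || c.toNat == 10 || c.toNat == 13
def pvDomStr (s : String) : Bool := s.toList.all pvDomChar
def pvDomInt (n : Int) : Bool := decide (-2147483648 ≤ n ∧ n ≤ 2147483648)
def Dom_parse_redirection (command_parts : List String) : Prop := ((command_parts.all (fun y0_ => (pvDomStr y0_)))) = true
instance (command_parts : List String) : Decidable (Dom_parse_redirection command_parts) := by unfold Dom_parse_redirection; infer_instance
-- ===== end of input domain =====

-- B replaces A's slice-and-rescan loop by one forward pass that copies non-operator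
-- tokens and skips operator+target pairs (objective: alternative single-pass algorithm).


-- ===== PORT A =====
-- A's while-loop, step for step: on an operator with a following target, record it and
-- rebuild the list as parts[:i] + parts[i+2:] (PySem.List.slice), keeping i; otherwise
-- i += 1.  The loop terminates (each step lowers 2*len-i), so a fuel counter started at
-- 2*len+1 only makes the same computation structurally recursive; it is never exhausted.
def goA (fuel : Nat) (parts : List String) (i : Nat) (so se : Option String) (sa ea : Bool) :
    List String × Option String × Option String × Bool × Bool :=
  match fuel with
  | 0 => (parts, so, se, sa, ea)
  | fuel + 1 =>
    if h : i < parts.length then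
      if parts[i] = ">" ∨ parts[i] = "1>" then
        if h2 : i + 1 < parts.length then
          goA fuel (PySem.List.slice parts none (some (i : Int)) ++
               PySem.List.slice parts (some ((i : Int) + 2)) none) i
              (some parts[i+1]) se false ea
        else goA fuel parts (i + 1) so se sa ea
      else if parts[i] = ">>" ∨ parts[i] = "1>>" then
        if h2 : i + 1 < parts.length then
          goA fuel (PySem.List.slice parts none (some (i : Int)) ++
               PySem.List.slice parts (some ((i : Int) + 2)) none) i
              (some parts[i+1]) se true ea
        else goA fuel parts (i + 1) so se sa ea
      else if parts[i] = "2>" then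
        if h2 : i + 1 < parts.length then
          goA fuel (PySem.List.slice parts none (some (i : Int)) ++
               PySem.List.slice parts (some ((i : Int) + 2)) none) i
              so (some parts[i+1]) sa false
        else goA fuel parts (i + 1) so se sa ea
      else if parts[i] = "2>>" then
        if h2 : i + 1 < parts.length then
          goA fuel (PySem.List.slice parts none (some (i : Int)) ++
               PySem.List.slice parts (some ((i : Int) + 2)) none) i
              so (some parts[i+1]) sa true
        else goA fuel parts (i + 1) so se sa ea
      else goA fuel parts (i + 1) so se sa ea
    else (parts, so, se, sa, ea)

def parse_redirection (command_parts : List String) :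
    List String × Option String × Option String × Bool × Bool :=
  goA (2 * command_parts.length + 1) command_parts 0 none none false false

-- ===== PORT B =====
def isRedirOp (tok : String) : Bool :=
  tok == ">" || tok == "1>" || tok == ">>" || tok == "1>>" || tok == "2>" || tok == "2>>"

-- B's single pass: `tok :: target :: rest2` is exactly B's "j + 1 < n" lookahead;
-- a lone trailing token (operator or not) is appended, as in B's else branch.
def goB (acc : List String) (so se : Option String) (sa ea : Bool) :
    List String → List String × Option String × Option String × Bool × Bool
  | [] => (acc, so, se, sa, ea)
  | [tok] => (acc ++ [tok], so, se, sa, ea)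
  | tok :: target :: rest2 =>
    if isRedirOp tok then
      if tok = ">" ∨ tok = "1>" then goB acc (some target) se false ea rest2
      else if tok = ">>" ∨ tok = "1>>" then goB acc (some target) se true ea rest2
      else if tok = "2>" then goB acc so (some target) sa false rest2
      else goB acc so (some target) sa true rest2
    else goB (acc ++ [tok]) so se sa ea (target :: rest2)

def parse_redirection_alt (command_parts : List String) :
    List String × Option String × Option String × Bool × Bool :=
  goB [] none none false false command_parts

-- ===== PRECONDITION & SPEC =====
def Spec_parse_redirection (command_parts : List String) (out : List String × Option String × Option String × Bool × Bool) : Prop := out = parse_redirection_alt command_parts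
instance (command_parts : List String) (out : List String × Option String × Option String × Bool × Bool) : Decidable (Spec_parse_redirection command_parts out) := by unfold Spec_parse_redirection; infer_instance

-- ===== CLAIM (what is proved, stated in full; the proofs are below) =====
def Claim_equal_parse_redirection : Prop := ∀ (command_parts : List String), Dom_parse_redirection command_parts → Spec_parse_redirection command_parts (parse_redirection command_parts)

-- ===== LEMMAS AND PROOFS =====

-- Loop invariant: A's scan over acc ++ rest with i = acc.length (the settled prefix acc
-- is what B has copied so far) computes B's pass over rest, given enough fuel.
theorem goA_goB (n : Nat) :
    ∀ (rest : List String), rest.length ≤ n →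
    ∀ (fuel : Nat), rest.length + 1 ≤ fuel →
    ∀ (acc : List String) (so se : Option String) (sa ea : Bool),
      goA fuel (acc ++ rest) acc.length so se sa ea = goB acc so se sa ea rest := by
  induction n with
  | zero =>
    intro rest hlen fuel hfuel acc so se sa ea
    have : rest = [] := List.length_eq_zero_iff.mp (Nat.le_zero.mp hlen)
    subst this
    obtain ⟨f, rfl⟩ : ∃ f, fuel = f + 1 := ⟨fuel - 1, by omega⟩
    simp [goA, goB]
  | succ n ih =>
    intro rest hlen fuel hfuel acc so se sa ea
    obtain ⟨f, rfl⟩ : ∃ f, fuel = f + 1 := ⟨fuel - 1, by omega⟩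
    match rest with
    | [] => simp [goA, goB]
    | [tok] =>
      have hi : acc.length < (acc ++ [tok]).length := by simp
      have hget : (acc ++ [tok])[acc.length]'hi = tok := by
        simp [List.getElem_append_right]
      have hnot2 : ¬ (acc.length + 1 < (acc ++ [tok]).length) := by simp
      have step : goA f (acc ++ [tok]) (acc.length + 1) so se sa ea
          = goB (acc ++ [tok]) so se sa ea [] := by
        have := ih [] (by simp) f (by simp only [List.length_cons, List.length_nil] at hfuel ⊢; omega)
          (acc ++ [tok]) so se sa ea
        simpa using this
      rw [goA]
      rw [dif_pos hi]
      simp only [hget]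
      rw [show goB acc so se sa ea [tok] = (acc ++ [tok], so, se, sa, ea) from rfl]
      have step' : goA f (acc ++ [tok]) (acc.length + 1) so se sa ea
          = (acc ++ [tok], so, se, sa, ea) := by rw [step]; rfl
      split_ifs <;>
        first
          | exact step'
          | (exfalso; exact hnot2 (by assumption))
    | tok :: target :: rest2 =>
      have hlen2 : rest2.length ≤ n := by simp only [List.length_cons] at hlen; omega
      have hfuel2 : rest2.length + 1 ≤ f := by simp only [List.length_cons] at hfuel; omega
      have hi : acc.length < (acc ++ tok :: target :: rest2).length := by simp
      have h2 : acc.length + 1 < (acc ++ tok :: target :: rest2).length := by simp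
      have hget : (acc ++ tok :: target :: rest2)[acc.length]'hi = tok := by
        simp [List.getElem_append_right]
      have hget1 : (acc ++ tok :: target :: rest2)[acc.length + 1]'h2 = target := by
        have e : acc ++ tok :: target :: rest2 = (acc ++ [tok]) ++ target :: rest2 := by simp
        simp only [e]
        rw [List.getElem_append_right (by simp)]
        simp
      have hsl : PySem.List.slice (acc ++ tok :: target :: rest2) none (some (acc.length : Int)) ++
          PySem.List.slice (acc ++ tok :: target :: rest2) (some ((acc.length : Int) + 2)) none
          = acc ++ rest2 := by
        rw [PySem.List.slice_to_natCast,
            show ((acc.length : Int) + 2) = ((acc.length + 2 : Nat) : Int) by push_cast; ring,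
            PySem.List.slice_from_natCast]
        have hdrop : (acc ++ tok :: target :: rest2).drop (acc.length + 2) = rest2 := by
          have e : acc ++ tok :: target :: rest2 = (acc ++ [tok, target]) ++ rest2 := by simp
          rw [e, show acc.length + 2 = (acc ++ [tok, target]).length by simp, List.drop_left]
        have htake : (acc ++ tok :: target :: rest2).take acc.length = acc := List.take_left
        rw [hdrop, htake]
      rw [goA, goB]
      rw [dif_pos hi]
      simp only [hget, hget1, dif_pos h2, hsl]
      by_cases hop : isRedirOp tok = true
      · rw [if_pos hop]
        split_ifs with h1 h2' h3 h4
        · exact ih rest2 hlen2 f (by omega) acc (some target) se false ea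
        · exact ih rest2 hlen2 f (by omega) acc (some target) se true ea
        · exact ih rest2 hlen2 f (by omega) acc so (some target) sa false
        · exact ih rest2 hlen2 f (by omega) acc so (some target) sa true
        · exfalso
          simp only [isRedirOp, Bool.or_eq_true, beq_iff_eq] at hop
          tauto
      · rw [if_neg hop]
        have hops : ¬(tok = ">" ∨ tok = "1>") ∧ ¬(tok = ">>" ∨ tok = "1>>") ∧ tok ≠ "2>" ∧ tok ≠ "2>>" := by
          simp only [isRedirOp, Bool.or_eq_true, beq_iff_eq] at hop
          tauto
        rw [if_neg hops.1, if_neg hops.2.1, if_neg hops.2.2.1, if_neg hops.2.2.2]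
        have step : goA f ((acc ++ [tok]) ++ target :: rest2) (acc ++ [tok]).length so se sa ea
            = goB (acc ++ [tok]) so se sa ea (target :: rest2) :=
          ih (target :: rest2)
            (by simp only [List.length_cons] at hlen ⊢; omega) f
            (by simp only [List.length_cons] at hfuel ⊢; omega) (acc ++ [tok]) so se sa ea
        simpa using step

-- ===== VERDICT (by name: the statement is the Claim_ definition above) =====
theorem parse_redirection_spec : Claim_equal_parse_redirection := by
  intro parts _
  unfold Spec_parse_redirection parse_redirection parse_redirection_alt
  simpa using goA_goB parts.length parts le_rfl (2 * parts.length + 1) (by omega)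
    [] none none false false
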